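-- pv_equiv track=rewrite | github.com/BMPixel/moffee | moffee/utils/md_helper.py | is_divider
-- ===== SOURCE A (Python) =====
-- def is_divider(line: str, type=None) -> bool:
--     """
--     Determines if a given line is a Markdown divider (horizontal rule).
--     Markdown dividers are three or more hyphens, asterisks, or underscores,
--     without any other characters except spaces.
--
--     :param line: The line to check
--     :param type: Which type to match, str. e.g. "*" to match "***" only. Defaults to "", match any of "*", "-" and "_".
--     :return: True if the line is a divider, False otherwise
--     """
--     stripped_line = line.strip()
--     if len(stripped_line) < 3:
--         return False
--     if type == None:
--         type = "-*_"
--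
--     assert type in "-*_", "type must be either '*', '-' or '_'"
--     return all(char in type for char in stripped_line) and any(
--         char * 3 in stripped_line for char in type
--     )
-- ===== SOURCE B (Python) =====
-- def is_divider(line: str, type=None) -> bool:
--     stripped_line = line.strip()
--     if len(stripped_line) < 3:
--         return False
--     if type == None:
--         type = "-*_"
--     assert type in "-*_", "type must be either '*', '-' or '_'"
--     # single pass: reject any disallowed char, and track runs of equal chars
--     prev = None
--     run = 0
--     has_run = False
--     for ch in stripped_line:
--         if ch not in type:
--             return False
--         run = run + 1 if ch == prev else 1
--         prev = ch
--         if run >= 3: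
--             has_run = True
--     return has_run
-- ===== Notes on version B (the rewrite author's own statement) =====
-- stated objective: alternative
-- what changed: Replaces the two separate scans (all-chars-allowed comprehension plus a per-type-character substring search for a tripled character) by one fused pass over the stripped line that rejects on the first disallowed character while tracking the length of the current run of equal characters and flagging any run of length >= 3.
import Mathlib
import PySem

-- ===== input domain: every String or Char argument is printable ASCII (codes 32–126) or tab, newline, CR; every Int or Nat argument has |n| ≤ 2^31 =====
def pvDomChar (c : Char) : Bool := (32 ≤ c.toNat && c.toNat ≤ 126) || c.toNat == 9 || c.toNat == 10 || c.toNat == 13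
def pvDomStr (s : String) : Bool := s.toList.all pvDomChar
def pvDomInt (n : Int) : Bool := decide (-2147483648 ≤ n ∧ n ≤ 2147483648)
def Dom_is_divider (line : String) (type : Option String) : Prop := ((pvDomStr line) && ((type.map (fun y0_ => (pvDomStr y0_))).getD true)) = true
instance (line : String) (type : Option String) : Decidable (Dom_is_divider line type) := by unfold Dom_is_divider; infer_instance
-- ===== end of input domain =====

-- B fuses A's two scans into one pass tracking runs of equal characters; same guards, same results (alternative decomposition, no speed claim).

-- ===== PORT A =====
def is_divider (line : String) (type : Option String) : Bool :=
  let stripped := PySem.Str.strip line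
  if PySem.Str.len stripped < 3 then false
  else
    let t := match type with | none => "-*_" | some s => s
    -- the assert on type: guaranteed by Pre_is_divider
    (stripped.toList.all (fun c => PySem.Chars.isIn [c] t.toList)) &&
    (t.toList.any (fun c => PySem.Chars.isIn [c, c, c] stripped.toList))

-- ===== PORT B =====
-- the fused single pass of Source B: reject a disallowed char, track run lengths
def altLoop (t : List Char) (prev : Option Char) (run : Nat) (hasRun : Bool) :
    List Char → Bool
  | [] => hasRun
  | c :: rest =>
    if PySem.Chars.isIn [c] t then
      let run' := if prev = some c then run + 1 else 1
      altLoop t (some c) run' (hasRun || decide (3 ≤ run')) rest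
    else false

def is_divider_alt (line : String) (type : Option String) : Bool :=
  let stripped := PySem.Str.strip line
  if PySem.Str.len stripped < 3 then false
  else
    let t := match type with | none => "-*_" | some s => s
    -- the assert on type: guaranteed by Pre_is_divider
    altLoop t.toList none 0 false stripped.toList

-- ===== PRECONDITION & SPEC =====
-- Pre_ excludes exactly the inputs on which the shared assert fails (the given type is
-- not a contiguous substring of the divider alphabet) AND the assert is reached (the
-- stripped line has length at least 3); both A and B raise AssertionError there.
def Pre_is_divider (line : String) (type : Option String) : Prop :=
  ((PySem.Chars.strip line.toList).length < 3) ∨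
  (type.map (fun s => PySem.Str.isIn s "-*_")).getD true = true
instance (line : String) (type : Option String) : Decidable (Pre_is_divider line type) := by
  unfold Pre_is_divider; infer_instance

def pvWitness_is_divider : String × Option String := ("---", none)

def Spec_is_divider (line : String) (type : Option String) (out : Bool) : Prop := out = is_divider_alt line type
instance (line : String) (type : Option String) (out : Bool) : Decidable (Spec_is_divider line type out) := by unfold Spec_is_divider; infer_instance

-- ===== CLAIM (what is proved, stated in full; the proofs are below) =====
def Claim_equal_is_divider : Prop := ∀ (line : String) (type : Option String), Dom_is_divider line type → Pre_is_divider line type → Spec_is_divider line type (is_divider line type)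

-- ===== LEMMAS AND PROOFS =====

-- the run-tracking part of altLoop, isolated from the allowed-char test
def tripFrom (prev : Option Char) (run : Nat) : List Char → Bool
  | [] => false
  | c :: rest =>
    let run' := if prev = some c then run + 1 else 1
    decide (3 ≤ run') || tripFrom (some c) run' rest

lemma altLoop_eq (t : List Char) :
    ∀ (l : List Char) (prev : Option Char) (run : Nat) (hasRun : Bool),
    altLoop t prev run hasRun l
      = ((l.all fun c => PySem.Chars.isIn [c] t) && (hasRun || tripFrom prev run l)) := by
  intro l
  induction l with
  | nil => intro prev run hasRun; simp [altLoop, tripFrom]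
  | cons c rest ih =>
    intro prev run hasRun
    by_cases h : PySem.Chars.isIn [c] t = true
    · simp only [altLoop, tripFrom, h, if_pos, List.all_cons, ih]
      cases hasRun <;> cases (decide (3 ≤ if prev = some c then run + 1 else 1)) <;> simp
    · simp [altLoop, tripFrom, h]

lemma no_triple_short (d : Char) (s : List Char) (hlen : s.length < 3) :
    ¬ [d, d, d] <:+: s := fun h => by
  have := h.length_le; simp at this; omega

lemma triple_cons_of_ne (c e : Char) (l : List Char) (hne : e ≠ c) :
    (∃ d, [d, d, d] <:+: c :: e :: l) ↔ (∃ d, [d, d, d] <:+: e :: l) := by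
  constructor
  · rintro ⟨d, hd⟩
    rcases List.infix_cons_iff.mp hd with hpre | hinf
    · rcases List.cons_prefix_cons.mp hpre with ⟨h1, hpre2⟩
      rcases List.cons_prefix_cons.mp hpre2 with ⟨h2, _⟩
      exact absurd (h2.symm.trans h1) hne
    · exact ⟨d, hinf⟩
  · rintro ⟨d, hd⟩; exact ⟨d, hd.trans (List.suffix_cons c (e :: l)).isInfix⟩

lemma tripFrom_some (l : List Char) :
    ∀ (c : Char) (k : Nat),
    tripFrom (some c) k l = true ↔ ∃ d, [d, d, d] <:+: (List.replicate (min k 2) c ++ l) := by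
  induction l with
  | nil =>
    intro c k
    simp only [tripFrom, List.append_nil]
    constructor
    · intro h; cases h
    · rintro ⟨d, hd⟩
      exact absurd hd (no_triple_short d _ (by simp))
  | cons e rest ih =>
    intro c k
    by_cases hec : c = e
    · subst hec
      simp only [tripFrom, if_true, Bool.or_eq_true, decide_eq_true_eq,
        ih c (k + 1)]
      match k with
      | 0 => simp
      | 1 => simp
      | (n + 2) =>
        constructor
        · intro _
          refine ⟨c, ?_⟩
          simp only [show min (n + 2) 2 = 2 from by omega, List.replicate]
          exact (List.prefix_append [c, c, c] rest).isInfix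
        · intro _; left; omega
    · simp only [tripFrom, Option.some.injEq, if_neg hec, Bool.or_eq_true, decide_eq_true_eq,
        ih e 1]
      have h31 : ¬ (3 ≤ 1) := by omega
      simp only [h31, false_or, show min 1 2 = 1 from rfl, List.replicate_one,
        List.singleton_append]
      match k with
      | 0 => simp
      | 1 =>
        simp only [show min 1 2 = 1 from rfl, List.replicate_one, List.singleton_append]
        exact (triple_cons_of_ne c e rest (fun h => hec h.symm)).symm
      | (n + 2) =>
        simp only [show min (n + 2) 2 = 2 from by omega, List.replicate, List.cons_append,
          List.nil_append]
        constructor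
        · rintro ⟨d, hd⟩
          exact ⟨d, hd.trans ((List.suffix_cons c (e :: rest)).trans
            (List.suffix_cons c (c :: e :: rest))).isInfix⟩
        · rintro ⟨d, hd⟩
          rcases List.infix_cons_iff.mp hd with hpre | hinf
          · rcases List.cons_prefix_cons.mp hpre with ⟨h1, hpre2⟩
            rcases List.cons_prefix_cons.mp hpre2 with ⟨h2, hpre3⟩
            rcases List.cons_prefix_cons.mp hpre3 with ⟨h3, _⟩
            exact absurd (h1.symm.trans h3) hec
          · exact (triple_cons_of_ne c e rest (fun h => hec h.symm)).mp ⟨d, hinf⟩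

lemma tripFrom_none (l : List Char) (k : Nat) :
    tripFrom none k l = true ↔ ∃ d, [d, d, d] <:+: l := by
  cases l with
  | nil =>
    simp only [tripFrom]
    constructor
    · intro h; cases h
    · rintro ⟨d, hd⟩; exact absurd hd (no_triple_short d [] (by simp))
  | cons c rest =>
    simp only [tripFrom, reduceCtorEq, if_false, Bool.or_eq_true, decide_eq_true_eq]
    have h31 : ¬ (3 ≤ 1) := by omega
    simp only [h31, false_or]
    rw [tripFrom_some rest c 1]
    simp [List.replicate]

lemma any_triple_eq (t l : List Char)
    (h : l.all (fun c => PySem.Chars.isIn [c] t) = true) :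
    (t.any fun c => PySem.Chars.isIn [c, c, c] l) = true ↔ ∃ d, [d, d, d] <:+: l := by
  rw [List.any_eq_true]
  constructor
  · rintro ⟨c, _, hc⟩
    exact ⟨c, (PySem.Chars.isIn_iff_infix _ _).mp hc⟩
  · rintro ⟨d, hd⟩
    have hdl : d ∈ l := hd.subset (by simp)
    have hdt : PySem.Chars.isIn [d] t = true := (List.all_eq_true.mp h) d hdl
    have : d ∈ t := ((PySem.Chars.isIn_iff_infix _ _).mp hdt).subset (by simp)
    exact ⟨d, this, (PySem.Chars.isIn_iff_infix _ _).mpr hd⟩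

-- ===== VERDICT (by name: the statement is the Claim_ definition above) =====
theorem is_divider_spec : Claim_equal_is_divider := by
  intro line type _ _
  unfold Spec_is_divider is_divider is_divider_alt
  simp only [PySem.Str.len, PySem.Str.toList_strip]
  by_cases hlen : ((PySem.Chars.strip line.toList).length : Int) < 3
  · rw [if_pos hlen, if_pos hlen]
  · rw [if_neg hlen, if_neg hlen]
    set t := (match type with | none => "-*_" | some s => s) with ht
    set l := PySem.Chars.strip line.toList with hl
    rw [altLoop_eq]
    by_cases hall : (l.all fun c => PySem.Chars.isIn [c] t.toList) = true
    · simp only [hall, Bool.true_and, Bool.false_or]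
      rw [Bool.eq_iff_iff, any_triple_eq t.toList l hall, tripFrom_none]
    · simp [Bool.eq_false_iff.mpr hall]
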